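-- pv_equiv track=rewrite | github.com/eliottcassidy2000/math | 04-computation/transfer_matrix_F_connection.py | compute_per_poly
-- ===== SOURCE A (Python) =====
-- from itertools import permutations
--
-- def compute_per_poly(adj, n):
--     """per(W(x)): unsigned version."""
--     per = [0]*(n+1)
--     for P in permutations(range(n)):
--         fwd = 0
--         valid = True
--         for i in range(n):
--             if i == P[i]:
--                 valid = False
--                 break
--             if adj[i][P[i]]:
--                 fwd += 1
--         if not valid:
--             continue
--         per[fwd] += 1
--     return per
-- ===== SOURCE B (Python) =====
-- def compute_per_poly(adj, n):
--     """per(W(x)): unsigned version, via a memoized subset DP (row expansion of the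
--     permanent with polynomial coefficient vectors) instead of permutation enumeration."""
--     memo = {}
--
--     def f(cols):  # cols: tuple of remaining column indices, ascending; row i = n - len(cols)
--         if not cols:
--             return [1] + [0] * n
--         if cols in memo:
--             return memo[cols]
--         i = n - len(cols)
--         res = [0] * (n + 1)
--         for idx, j in enumerate(cols):
--             if j == i:
--                 continue
--             sub = f(cols[:idx] + cols[idx + 1:])
--             if adj[i][j]:
--                 for k in range(n):
--                     res[k + 1] += sub[k]
--             else:
--                 for k in range(n + 1):
--                     res[k] += sub[k]
--         memo[cols] = res
--         return res
--
--     return f(tuple(range(n)))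
-- ===== Notes on version B (the rewrite author's own statement) =====
-- stated objective: alternative
-- what changed: Replaces A's enumeration of all n! permutations by a memoized subset DP: recursive row expansion of the permanent over the set of still-unused columns, with polynomial coefficient vectors of length n+1 as values.
import Mathlib
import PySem

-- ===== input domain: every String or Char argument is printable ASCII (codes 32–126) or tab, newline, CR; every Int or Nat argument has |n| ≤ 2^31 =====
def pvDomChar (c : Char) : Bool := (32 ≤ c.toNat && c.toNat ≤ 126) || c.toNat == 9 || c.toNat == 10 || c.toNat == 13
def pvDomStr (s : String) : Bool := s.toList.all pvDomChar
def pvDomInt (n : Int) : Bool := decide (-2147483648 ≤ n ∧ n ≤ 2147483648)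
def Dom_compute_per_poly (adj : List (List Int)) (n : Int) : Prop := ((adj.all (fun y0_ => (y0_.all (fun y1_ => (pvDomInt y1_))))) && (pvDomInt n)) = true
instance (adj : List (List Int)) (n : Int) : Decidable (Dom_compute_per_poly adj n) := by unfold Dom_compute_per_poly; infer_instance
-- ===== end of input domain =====

-- B replaces A's enumeration of all permutations by a memoized subset DP (recursive row expansion
-- of the permanent over unused-column sets, with polynomial coefficient vectors); the return
-- values are proved equal on Pre_ (no side effects in either version).

-- ===== PORT A =====
-- itertools.permutations(range(n)): lexicographic generation — pick each element in turn,
-- then permute the rest; fuel = number of remaining picks (= length of the list).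
def pvSelections : List Int → List (Int × List Int)
  | [] => []
  | x :: xs => (x, xs) :: (pvSelections xs).map (fun p => (p.1, x :: p.2))

def pvPerms (adjFuel : Nat) (l : List Int) : List (List Int) :=
  match adjFuel with
  | 0 => [[]]
  | m + 1 => (pvSelections l).flatMap (fun p => (pvPerms m p.2).map (fun q => p.1 :: q))

-- inner 'for i in range(n)' of A: P has length n, so the loop walks P with its index;
-- indexing uses getD (in range whenever Python does not raise, entries of P are ≥ 0).
def pvALoop (adj : List (List Int)) : Nat → List Int → Int → Bool × Int
  | _, [], fwd => (true, fwd)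
  | i, j :: rest, fwd =>
    if (i : Int) = j then (false, fwd)
    else pvALoop adj (i + 1) rest (if (adj.getD i []).getD j.toNat 0 ≠ 0 then fwd + 1 else fwd)

-- per[fwd] += 1 (index in range whenever Python does not raise)
def pvIncAt : List Int → Nat → List Int
  | [], _ => []
  | x :: xs, 0 => (x + 1) :: xs
  | x :: xs, k + 1 => x :: pvIncAt xs k

def compute_per_poly (adj : List (List Int)) (n : Int) : List Int :=
  (pvPerms (PySem.List.pyRange 0 n 1).length (PySem.List.pyRange 0 n 1)).foldl
    (fun per P =>
      let r := pvALoop adj 0 P 0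
      if r.1 then pvIncAt per r.2.toNat else per)
    (List.replicate (n + 1).toNat 0)

-- ===== PORT B =====
-- 'for idx, j in enumerate(cols)' together with cols[:idx]+cols[idx+1:]: each element paired
-- with the list with it removed, in order.
def pvRemovals : List Int → List (Int × List Int)
  | [] => []
  | x :: xs => (x, xs) :: (pvRemovals xs).map (fun p => (p.1, x :: p.2))

-- res[k+1] += sub[k] (edge) / res[k] += sub[k] (no edge), both vectors of length n+1
def pvAddInto (edge : Bool) (res sub : List Int) : List Int :=
  if edge then
    match res with
    | [] => []
    | r0 :: rt => r0 :: List.zipWith (· + ·) rt sub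
  else List.zipWith (· + ·) res sub

-- Source B's recursive f(cols); the memo dict is an evaluation cache and does not change values,
-- it is dropped in the port; fuel = len(cols) (the recursion removes one column per step).
def pvFBAux (adj : List (List Int)) (n : Int) : Nat → List Int → List Int
  | 0, _ => 1 :: List.replicate n.toNat 0
  | m + 1, cols =>
    (pvRemovals cols).foldl
      (fun res p =>
        if p.1 = n - (cols.length : Int) then res
        else pvAddInto ((adj.getD (n - (cols.length : Int)).toNat []).getD p.1.toNat 0 ≠ 0)
               res (pvFBAux adj n m p.2))
      (List.replicate (n + 1).toNat 0)

def compute_per_poly_alt (adj : List (List Int)) (n : Int) : List Int :=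
  pvFBAux adj n (PySem.List.pyRange 0 n 1).length (PySem.List.pyRange 0 n 1)

-- ===== PRECONDITION & SPEC =====
-- Pre_ excludes exactly the inputs on which A raises: n < 0 (per[0] += 1 on a too-short list)
-- and, for n ≥ 2, a missing off-diagonal entry adj[i][j] (i ≠ j, i, j < n) — row i must have
-- length ≥ n, except the last row, which only needs columns 0..n-2. For n ≤ 1 the adjacency
-- matrix is never touched.
def Pre_compute_per_poly (adj : List (List Int)) (n : Int) : Prop :=
  0 ≤ n ∧ (1 < n → n.toNat ≤ adj.length ∧
    ∀ i ∈ List.range n.toNat,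
      (if i = n.toNat - 1 then n.toNat - 1 else n.toNat) ≤ (adj.getD i []).length)
instance (adj : List (List Int)) (n : Int) : Decidable (Pre_compute_per_poly adj n) := by
  unfold Pre_compute_per_poly; infer_instance

def pvWitness_compute_per_poly : List (List Int) × Int := ([[0, 1], [1, 0]], 2)

def Spec_compute_per_poly (adj : List (List Int)) (n : Int) (out : List Int) : Prop := out = compute_per_poly_alt adj n
instance (adj : List (List Int)) (n : Int) (out : List Int) : Decidable (Spec_compute_per_poly adj n out) := by unfold Spec_compute_per_poly; infer_instance

-- ===== CLAIM (what is proved, stated in full; the proofs are below) =====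
def Claim_equal_compute_per_poly : Prop := ∀ (adj : List (List Int)) (n : Int), Dom_compute_per_poly adj n → Pre_compute_per_poly adj n → Spec_compute_per_poly adj n (compute_per_poly adj n)



-- ===== LEMMAS AND PROOFS =====

-- vector toolkit: all polynomial coefficient vectors have length N+1 (N = n.toNat)
def vAdd (a b : List Int) : List Int := List.zipWith (· + ·) a b
def zeroV (N : Nat) : List Int := List.replicate (N + 1) 0
def unitV (N k : Nat) : List Int := List.replicate k 0 ++ 1 :: List.replicate (N - k) 0
def shiftV (N : Nat) (v : List Int) : List Int := 0 :: v.take N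

-- the contribution of one permutation suffix P (rows i, i+1, …) to the answer vector
def contrib (adj : List (List Int)) (N : Nat) : Nat → List Int → List Int
  | _, [] => unitV N 0
  | i, j :: P =>
    if (i : Int) = j then zeroV N
    else if (adj.getD i []).getD j.toNat 0 ≠ 0 then shiftV N (contrib adj N (i + 1) P)
    else contrib adj N (i + 1) P

-- sum of contributions over a list of permutations
def sumC (N : Nat) (c : List Int → List Int) (l : List (List Int)) : List Int :=
  l.foldr (fun x b => vAdd (c x) b) (zeroV N)

-- A's inner loop, characterised: validity flag and (when valid) edge count
def validB (adj : List (List Int)) : Nat → List Int → Bool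
  | _, [] => true
  | i, j :: P => if (i : Int) = j then false else validB adj (i + 1) P

def cntB (adj : List (List Int)) : Nat → List Int → Nat
  | _, [] => 0
  | i, j :: P => (if (adj.getD i []).getD j.toNat 0 ≠ 0 then 1 else 0) + cntB adj (i + 1) P

theorem pvRemovals_eq : ∀ l : List Int, pvRemovals l = pvSelections l := by
  intro l; induction l with
  | nil => rfl
  | cons x xs ih => simp [pvRemovals, pvSelections, ih]

theorem sel_len : ∀ (l : List Int) (p : Int × List Int), p ∈ pvSelections l → p.2.length + 1 = l.length := by
  intro l; induction l with
  | nil => intro p h; simp [pvSelections] at h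
  | cons x xs ih =>
    intro p h
    simp only [pvSelections, List.mem_cons, List.mem_map] at h
    rcases h with h | ⟨q, hq, rfl⟩
    · subst h; simp
    · have := ih q hq; simp only [List.length_cons]; omega

theorem perms_mem_len : ∀ (m : Nat) (l : List Int) (P : List Int), P ∈ pvPerms m l → P.length = m := by
  intro m; induction m with
  | zero => intro l P h; simp [pvPerms] at h; simp [h]
  | succ m ih =>
    intro l P h
    simp only [pvPerms, List.mem_flatMap, List.mem_map] at h
    obtain ⟨p, _, q, hq, rfl⟩ := h
    simp [ih p.2 q hq]

theorem vAdd_length (a b : List Int) : (vAdd a b).length = min a.length b.length := by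
  simp [vAdd]

theorem vAdd_zero_right : ∀ a : List Int, vAdd a (List.replicate a.length 0) = a := by
  intro a; induction a with
  | nil => rfl
  | cons x xs ih => simp [vAdd, List.replicate_succ] at ih ⊢; exact ih

theorem vAdd_zero_right' {N : Nat} {a : List Int} (h : a.length = N + 1) : vAdd a (zeroV N) = a := by
  have := vAdd_zero_right a; rwa [h] at this

theorem vAdd_zero_left : ∀ a : List Int, vAdd (List.replicate a.length 0) a = a := by
  intro a; induction a with
  | nil => rfl
  | cons x xs ih => simp [vAdd, List.replicate_succ] at ih ⊢; exact ih

theorem vAdd_zero_left' {N : Nat} {a : List Int} (h : a.length = N + 1) : vAdd (zeroV N) a = a := by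
  have := vAdd_zero_left a; rwa [h] at this

theorem vAdd_assoc : ∀ a b c : List Int, vAdd (vAdd a b) c = vAdd a (vAdd b c) := by
  intro a
  induction a with
  | nil => intro b c; rfl
  | cons x xs ih =>
    intro b c
    cases b with
    | nil => rfl
    | cons y ys =>
      cases c with
      | nil => rfl
      | cons z zs =>
        simp only [vAdd, List.zipWith_cons_cons] at ih ⊢
        rw [ih ys zs]
        congr 1
        ring

theorem zipWith_trunc : ∀ (a b : List Int), a.length ≤ b.length →
    List.zipWith (· + ·) a (b.take a.length) = List.zipWith (· + ·) a b := by
  intro a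
  induction a with
  | nil => intro b _; rfl
  | cons x xs ih =>
    intro b h
    cases b with
    | nil => simp at h
    | cons y ys =>
      simp only [List.length_cons, List.take_succ_cons, List.zipWith_cons_cons]
      rw [ih ys (by simpa using h)]

theorem unitV_length {N k : Nat} (h : k ≤ N) : (unitV N k).length = N + 1 := by
  simp [unitV]; omega

theorem zeroV_length (N : Nat) : (zeroV N).length = N + 1 := by simp [zeroV]

theorem shiftV_zero (N : Nat) : shiftV N (zeroV N) = zeroV N := by
  show (0:Int) :: (List.replicate (N + 1) (0:Int)).take N = List.replicate (N + 1) 0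
  rw [List.take_replicate]
  have h : min N (N + 1) = N := by omega
  rw [h, List.replicate_succ]

theorem unitV_succ (N k : Nat) : unitV (N + 1) (k + 1) = 0 :: unitV N k := by
  simp only [unitV, List.replicate_succ, List.cons_append]
  have h : N + 1 - (k + 1) = N - k := by omega
  rw [h]

theorem shiftV_unit : ∀ (k N : Nat), k < N → shiftV N (unitV N k) = unitV N (k + 1) := by
  intro k
  induction k with
  | zero =>
    intro N h
    obtain ⟨N', rfl⟩ : ∃ N', N = N' + 1 := ⟨N - 1, by omega⟩
    show (0:Int) :: (unitV (N' + 1) 0).take (N' + 1) = unitV (N' + 1) 1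
    have h0 : unitV (N' + 1) 0 = 1 :: List.replicate (N' + 1) 0 := by simp [unitV]
    have h1 : unitV (N' + 1) 1 = 0 :: unitV N' 0 := unitV_succ N' 0
    rw [h0, h1, List.take_succ_cons, List.take_replicate]
    have h2 : min N' (N' + 1) = N' := by omega
    rw [h2]
    simp [unitV]
  | succ k ihk =>
    intro N h
    obtain ⟨N', rfl⟩ : ∃ N', N = N' + 1 := ⟨N - 1, by omega⟩
    rw [unitV_succ N' k, unitV_succ N' (k + 1)]
    show (0:Int) :: ((0 :: unitV N' k).take (N' + 1)) = 0 :: unitV N' (k + 1)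
    rw [List.take_succ_cons]
    have ih := ihk N' (by omega)
    simp only [shiftV] at ih
    rw [← ih]

theorem shiftV_vAdd {N : Nat} {a b : List Int} :
    shiftV N (vAdd a b) = vAdd (shiftV N a) (shiftV N b) := by
  simp only [shiftV, vAdd, List.zipWith_cons_cons, List.take_zipWith]
  simp

theorem cntB_le : ∀ (P : List Int) (adj : List (List Int)) (i : Nat), cntB adj i P ≤ P.length := by
  intro P
  induction P with
  | nil => intro adj i; simp [cntB]
  | cons j P ih =>
    intro adj i
    simp only [cntB, List.length_cons]
    have := ih adj (i + 1)
    split <;> omega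

theorem contrib_char : ∀ (P : List Int) (adj : List (List Int)) (N i : Nat), P.length ≤ N →
    contrib adj N i P = if validB adj i P then unitV N (cntB adj i P) else zeroV N := by
  intro P
  induction P with
  | nil => intro adj N i _; simp [contrib, validB, cntB]
  | cons j P ih =>
    intro adj N i hlen
    have hlen' : P.length ≤ N := by simp at hlen; omega
    simp only [contrib, validB, cntB]
    by_cases hij : (i : Int) = j
    · simp [hij]
    · rw [if_neg hij, if_neg hij, ih adj N (i + 1) hlen']
      by_cases he : (adj.getD i []).getD j.toNat 0 ≠ 0
      · rw [if_pos he, if_pos he]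
        by_cases hv : validB adj (i + 1) P = true
        · rw [if_pos hv, if_pos hv]
          have hc : cntB adj (i + 1) P < N := by
            have := cntB_le P adj (i + 1)
            simp at hlen; omega
          rw [shiftV_unit _ _ hc, Nat.add_comm]
        · rw [if_neg hv, if_neg hv, shiftV_zero]
      · rw [if_neg he, if_neg he]
        by_cases hv : validB adj (i + 1) P = true
        · rw [if_pos hv, if_pos hv, Nat.zero_add]
        · rw [if_neg hv, if_neg hv]

theorem pvALoop_fst : ∀ (P : List Int) (adj : List (List Int)) (i : Nat) (fwd : Int),
    (pvALoop adj i P fwd).1 = validB adj i P := by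
  intro P
  induction P with
  | nil => intro adj i fwd; rfl
  | cons j P ih =>
    intro adj i fwd
    simp only [pvALoop, validB]
    split
    · rfl
    · exact ih adj (i + 1) _

theorem pvALoop_snd : ∀ (P : List Int) (adj : List (List Int)) (i : Nat) (fwd : Int),
    validB adj i P = true → (pvALoop adj i P fwd).2 = fwd + (cntB adj i P : Int) := by
  intro P
  induction P with
  | nil => intro adj i fwd _; simp [pvALoop, cntB]
  | cons j P ih =>
    intro adj i fwd hv
    simp only [validB] at hv
    split at hv
    · simp at hv
    · simp only [pvALoop]
      rename_i hij
      rw [if_neg hij]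
      simp only [cntB]
      rw [ih adj (i + 1) _ hv]
      split <;> push_cast <;> ring

theorem pvIncAt_eq : ∀ (per : List Int) (k : Nat), k < per.length →
    pvIncAt per k = vAdd per (List.replicate k 0 ++ 1 :: List.replicate (per.length - (k + 1)) 0) := by
  intro per
  induction per with
  | nil => intro k h; simp at h
  | cons x xs ih =>
    intro k h
    cases k with
    | zero =>
      simp only [pvIncAt, List.length_cons, Nat.add_sub_cancel, List.replicate_zero,
        List.nil_append, vAdd, List.zipWith_cons_cons]
      have h1 := vAdd_zero_right xs
      simp only [vAdd] at h1
      rw [h1]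
    | succ k =>
      have h' : k < xs.length := by simpa using h
      simp only [pvIncAt, List.replicate_succ, List.cons_append, vAdd,
        List.zipWith_cons_cons, List.length_cons]
      have harith : xs.length + 1 - (k + 1 + 1) = xs.length - (k + 1) := by omega
      rw [harith]
      have h1 := ih k h'
      simp only [vAdd] at h1
      rw [h1]
      norm_num

theorem pvIncAt_unit {N : Nat} {per : List Int} (h : per.length = N + 1) {k : Nat} (hk : k ≤ N) :
    pvIncAt per k = vAdd per (unitV N k) := by
  rw [pvIncAt_eq per k (by omega), h]
  have h2 : N + 1 - (k + 1) = N - k := by omega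
  rw [h2]; rfl

theorem sumC_cons {N : Nat} (c : List Int → List Int) (x : List Int) (l : List (List Int)) :
    sumC N c (x :: l) = vAdd (c x) (sumC N c l) := rfl

theorem sumC_nil {N : Nat} (c : List Int → List Int) : sumC N c [] = zeroV N := rfl

theorem sumC_length {N : Nat} (c : List Int → List Int) :
    ∀ l : List (List Int), (∀ x ∈ l, (c x).length = N + 1) → (sumC N c l).length = N + 1 := by
  intro l
  induction l with
  | nil => intro _; simp [sumC, zeroV]
  | cons x xs ih =>
    intro h
    rw [sumC_cons, vAdd_length, h x (by simp), ih (fun y hy => h y (by simp [hy]))]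
    omega

theorem sumC_congr {N : Nat} {c c' : List Int → List Int} :
    ∀ l : List (List Int), (∀ x ∈ l, c x = c' x) → sumC N c l = sumC N c' l := by
  intro l
  induction l with
  | nil => intro _; rfl
  | cons x xs ih =>
    intro h
    simp only [sumC_cons, h x (by simp), ih (fun y hy => h y (by simp [hy]))]

theorem sumC_map {N : Nat} (c : List Int → List Int) (f : List Int → List Int) (l : List (List Int)) :
    sumC N c (l.map f) = sumC N (c ∘ f) l := by
  simp only [sumC, List.foldr_map]
  rfl

theorem sumC_zero {N : Nat} (l : List (List Int)) : sumC N (fun _ => zeroV N) l = zeroV N := by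
  induction l with
  | nil => rfl
  | cons x xs ih => rw [sumC_cons, ih, vAdd_zero_right' (zeroV_length N)]

theorem sumC_append {N : Nat} (c : List Int → List Int) :
    ∀ (l1 l2 : List (List Int)), (∀ x ∈ l2, (c x).length = N + 1) →
      sumC N c (l1 ++ l2) = vAdd (sumC N c l1) (sumC N c l2) := by
  intro l1 l2 h2
  induction l1 with
  | nil =>
    rw [List.nil_append, sumC_nil, vAdd_zero_left' (sumC_length c l2 h2)]
  | cons x xs ih =>
    simp only [List.cons_append, sumC_cons, ih, vAdd_assoc]

theorem shiftV_sumC {N : Nat} (c : List Int → List Int) :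
    ∀ l : List (List Int), (∀ x ∈ l, (c x).length = N + 1) →
      shiftV N (sumC N c l) = sumC N (fun x => shiftV N (c x)) l := by
  intro l
  induction l with
  | nil => intro _; simpa [sumC_nil] using shiftV_zero N
  | cons x xs ih =>
    intro h
    rw [sumC_cons, sumC_cons,
      shiftV_vAdd, ih (fun y hy => h y (by simp [hy]))]

theorem addInto_eq {N : Nat} (c : Prop) [Decidable c] {res sub : List Int}
    (hr : res.length = N + 1) (hs : sub.length = N + 1) :
    pvAddInto (decide c) res sub = vAdd res (if c then shiftV N sub else sub) := by
  by_cases hc : c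
  · rw [if_pos hc, decide_eq_true hc]
    cases res with
    | nil => simp at hr
    | cons r0 rt =>
      simp only [pvAddInto, if_true, shiftV, vAdd, List.zipWith_cons_cons]
      have hrt : rt.length = N := by simp at hr; omega
      have h1 : List.zipWith (· + ·) rt (sub.take N) = List.zipWith (· + ·) rt sub := by
        rw [← hrt]; exact zipWith_trunc rt sub (by omega)
      rw [h1]
      norm_num
  · rw [if_neg hc, decide_eq_false hc]
    simp [pvAddInto, vAdd]

-- contribution vectors have the right length
theorem contrib_length {adj : List (List Int)} {N i : Nat} {P : List Int} (h : P.length ≤ N) :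
    (contrib adj N i P).length = N + 1 := by
  rw [contrib_char P adj N i h]
  split
  · exact unitV_length (le_trans (cntB_le P adj i) h)
  · exact zeroV_length N

-- ===== A characterised as a sum of contributions =====
theorem step_eq {adj : List (List Int)} {N : Nat} {per P : List Int}
    (hper : per.length = N + 1) (hP : P.length = N) :
    (if (pvALoop adj 0 P 0).1 then pvIncAt per (pvALoop adj 0 P 0).2.toNat else per)
      = vAdd per (contrib adj N 0 P) := by
  rw [pvALoop_fst P adj 0 0, contrib_char P adj N 0 (le_of_eq hP)]
  by_cases hv : validB adj 0 P = true
  · rw [if_pos hv, if_pos hv, pvALoop_snd P adj 0 0 hv]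
    simp only [zero_add, Int.toNat_natCast]
    exact pvIncAt_unit hper (hP ▸ cntB_le P adj 0)
  · rw [if_neg hv, if_neg hv]
    exact (vAdd_zero_right' hper).symm

theorem a_foldl {adj : List (List Int)} {N : Nat} :
    ∀ (l : List (List Int)) (acc : List Int), acc.length = N + 1 → (∀ P ∈ l, P.length = N) →
      l.foldl (fun per P => if (pvALoop adj 0 P 0).1 then pvIncAt per (pvALoop adj 0 P 0).2.toNat else per) acc
        = vAdd acc (sumC N (contrib adj N 0) l) := by
  intro l
  induction l with
  | nil =>
    intro acc ha _
    rw [List.foldl_nil, sumC_nil, vAdd_zero_right' ha]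
  | cons P l ih =>
    intro acc ha h
    simp only [List.foldl_cons, sumC_cons]
    rw [step_eq ha (h P (by simp)),
      ih (vAdd acc (contrib adj N 0 P))
        (by rw [vAdd_length, ha, contrib_length (le_of_eq (h P (by simp)))]; omega)
        (fun Q hQ => h Q (by simp [hQ])), vAdd_assoc]

theorem a_eq (adj : List (List Int)) (n : Int) (N : Nat) (hn : (N : Int) = n) :
    compute_per_poly adj n = sumC N (contrib adj N 0) (pvPerms N (PySem.List.pyRange 0 n 1)) := by
  have hlen : (PySem.List.pyRange 0 n 1).length = N := by
    rw [PySem.List.length_pyRange_one]; omega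
  have hnn : (n + 1).toNat = N + 1 := by omega
  unfold compute_per_poly
  rw [hlen, hnn]
  rw [a_foldl (pvPerms N (PySem.List.pyRange 0 n 1)) (List.replicate (N + 1) 0)
    (by simp) (fun P hP => perms_mem_len N _ P hP)]
  exact vAdd_zero_left' (sumC_length _ _ (fun P hP => contrib_length (le_of_eq (perms_mem_len N _ P hP))))

-- ===== B characterised as the same sum =====
theorem fb_eq (adj : List (List Int)) (n : Int) (N : Nat) (hn : (N : Int) = n) :
    ∀ (m : Nat) (cols : List Int), cols.length = m → m ≤ N →
      pvFBAux adj n m cols = sumC N (contrib adj N (N - m)) (pvPerms m cols) := by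
  intro m
  induction m with
  | zero =>
    intro cols _ _
    have hN : n.toNat = N := by omega
    simp only [pvFBAux, pvPerms, hN]
    rw [sumC_cons, show contrib adj N (N - 0) [] = unitV N 0 from rfl, sumC_nil,
      vAdd_zero_right' (unitV_length (Nat.zero_le N))]
    simp [unitV]
  | succ m ih =>
    intro cols hcols hm
    have hnn : (n + 1).toNat = N + 1 := by omega
    have hI : n - (cols.length : Int) = ((N - (m + 1) : Nat) : Int) := by
      rw [hcols]; omega
    have hItoNat : (n - (cols.length : Int)).toNat = N - (m + 1) := by
      rw [hI]; exact Int.toNat_natCast _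
    have main : ∀ (sl : List (Int × List Int)), (∀ p ∈ sl, p.2.length = m) →
        ∀ acc : List Int, acc.length = N + 1 →
        sl.foldl (fun res p =>
          if p.1 = n - (cols.length : Int) then res
          else pvAddInto ((adj.getD (n - (cols.length : Int)).toNat []).getD p.1.toNat 0 ≠ 0)
                 res (pvFBAux adj n m p.2)) acc
        = vAdd acc (sumC N (contrib adj N (N - (m + 1)))
            (sl.flatMap (fun p => (pvPerms m p.2).map (fun q => p.1 :: q)))) := by
      intro sl
      induction sl with
      | nil =>
        intro _ acc ha
        rw [List.foldl_nil, List.flatMap_nil, sumC_nil, vAdd_zero_right' ha]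
      | cons p sl ihs =>
        intro hsl acc ha
        have hp2 : p.2.length = m := hsl p (by simp)
        have hmemlen : ∀ q ∈ pvPerms m p.2, (contrib adj N (N - m) q).length = N + 1 :=
          fun q hq => contrib_length (by have := perms_mem_len m p.2 q hq; omega)
        have hsub : pvFBAux adj n m p.2 = sumC N (contrib adj N (N - m)) (pvPerms m p.2) :=
          ih p.2 hp2 (by omega)
        have hsumlen : (sumC N (contrib adj N (N - m)) (pvPerms m p.2)).length = N + 1 :=
          sumC_length _ _ hmemlen
        have hconslen : ∀ P ∈ (pvPerms m p.2).map (fun q => p.1 :: q),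
            (contrib adj N (N - (m + 1)) P).length = N + 1 := by
          intro P hP
          simp only [List.mem_map] at hP
          obtain ⟨q, hq, rfl⟩ := hP
          have hql : q.length = m := perms_mem_len m p.2 q hq
          exact contrib_length (by simp only [List.length_cons, hql]; omega)
        have hcontrib : ∀ q ∈ pvPerms m p.2,
            (contrib adj N (N - (m + 1)) ∘ fun q => p.1 :: q) q
              = if ((N - (m + 1) : Nat) : Int) = p.1 then zeroV N
                else if (adj.getD (N - (m + 1)) []).getD p.1.toNat 0 ≠ 0
                     then shiftV N (contrib adj N (N - m) q) else contrib adj N (N - m) q := by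
          intro q _
          simp only [Function.comp_apply, contrib]
          have h1 : N - (m + 1) + 1 = N - m := by omega
          rw [h1]
        have hstep : (if p.1 = n - (cols.length : Int) then acc
              else pvAddInto ((adj.getD (n - (cols.length : Int)).toNat []).getD p.1.toNat 0 ≠ 0)
                     acc (pvFBAux adj n m p.2))
            = vAdd acc (sumC N (contrib adj N (N - (m + 1)))
                ((pvPerms m p.2).map (fun q => p.1 :: q))) := by
          rw [sumC_map]
          by_cases hij : p.1 = n - (cols.length : Int)
          · rw [if_pos hij]
            have hz : ∀ q ∈ pvPerms m p.2,
                (contrib adj N (N - (m + 1)) ∘ fun q => p.1 :: q) q = zeroV N := by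
              intro q hq
              rw [hcontrib q hq, if_pos (by rw [← hI, hij])]
            rw [sumC_congr _ hz, sumC_zero]
            exact (vAdd_zero_right' ha).symm
          · rw [if_neg hij]
            have hij' : ¬(((N - (m + 1) : Nat) : Int) = p.1) := by
              rw [← hI]; exact fun hh => hij hh.symm
            rw [hItoNat, hsub, addInto_eq _ ha hsumlen]
            by_cases he : (adj.getD (N - (m + 1)) []).getD p.1.toNat 0 ≠ 0
            · rw [if_pos he, shiftV_sumC _ _ hmemlen]
              congr 1
              exact (sumC_congr _ (fun q hq => by rw [hcontrib q hq, if_neg hij', if_pos he])).symm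
            · rw [if_neg he]
              congr 1
              exact (sumC_congr _ (fun q hq => by rw [hcontrib q hq, if_neg hij', if_neg he])).symm
        simp only [List.foldl_cons, List.flatMap_cons]
        rw [hstep,
          ihs (fun q hq => hsl q (by simp [hq])) _
            (by rw [vAdd_length, ha, sumC_length _ _ hconslen]; omega),
          vAdd_assoc]
        congr 1
        rw [sumC_append _ _ _ (by
          intro P hP
          simp only [List.mem_flatMap, List.mem_map] at hP
          obtain ⟨p', hp', q, hq, rfl⟩ := hP
          have hl' := hsl p' (by simp [hp'])
          have hql : q.length = m := perms_mem_len m p'.2 q hq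
          exact contrib_length (by simp only [List.length_cons, hql]; omega))]
    simp only [pvFBAux, pvPerms, pvRemovals_eq, hnn]
    rw [main (pvSelections cols) (fun p hp => by have := sel_len cols p hp; omega)
      (List.replicate (N + 1) 0) (by simp)]
    exact vAdd_zero_left' (sumC_length _ _ (by
      intro P hP
      simp only [List.mem_flatMap, List.mem_map] at hP
      obtain ⟨p', hp', q, hq, rfl⟩ := hP
      have := sel_len cols p' hp'
      have hql : q.length = m := perms_mem_len m p'.2 q hq
      exact contrib_length (by simp only [List.length_cons, hql]; omega)))

-- ===== VERDICT (by name: the statement is the Claim_ definition above) =====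
theorem compute_per_poly_spec : Claim_equal_compute_per_poly := by
  intro adj n _ hPre
  obtain ⟨h0, -⟩ := hPre
  have hn : ((n.toNat : Nat) : Int) = n := Int.toNat_of_nonneg h0
  unfold Spec_compute_per_poly
  rw [a_eq adj n n.toNat hn]
  unfold compute_per_poly_alt
  have hlen : (PySem.List.pyRange 0 n 1).length = n.toNat := by
    rw [PySem.List.length_pyRange_one]; omega
  rw [hlen, fb_eq adj n n.toNat hn n.toNat (PySem.List.pyRange 0 n 1) hlen (le_refl _),
    Nat.sub_self]
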